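-- pv_equiv track=rewrite | github.com/christianriccio/PLAsTiCC-Challenge- | Preprocessing.py | makeIntervals
-- ===== SOURCE A (Python) =====
-- def makeIntervals(interval, scores, threshold=50):
--     news = []
--     x_in = None
--     x_fin = None
--     mask = []
--     for i in range(len(interval)):
--         if scores[i] < threshold:
--             mask.append(False)
--             if x_in is None:
--                 continue
--             x_fin = interval[i]
--             news.append((x_in, x_fin))
--             x_in = None
--             x_fin = None
--         else:
--             mask.append(True)
--             if x_in is None:
--                 x_in = interval[i]
--             else:
--                 x_fin = interval[i]
--     return news
-- ===== SOURCE B (Python) =====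
-- def makeIntervals(interval, scores, threshold=50):
--     # Pass 1: segment into maximal runs of equal truth of (score >= threshold),
--     # recording each run's flag and the interval value at its first index.
--     runs = []
--     for v, s in zip(interval, scores):
--         f = s >= threshold
--         if not runs or runs[-1][0] != f:
--             runs.append((f, v))
--     # Pass 2: a high run immediately followed by a low run yields one interval,
--     # opening at the high run's first value and closing at the low run's first value.
--     news = []
--     for (f1, v1), (f2, v2) in zip(runs, runs[1:]):
--         if f1 and not f2:
--             news.append((v1, v2))
--     return news
-- ===== Notes on version B (the rewrite author's own statement) =====
-- stated objective: alternative
-- what changed: Instead of A's single stateful scan carrying open/close sentinels (x_in/x_fin) and an unused mask, B first segments the zipped (interval, score) pairs into maximal runs of equal truth of score >= threshold, then pairs each high run with the immediately following low run.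
import Mathlib
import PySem

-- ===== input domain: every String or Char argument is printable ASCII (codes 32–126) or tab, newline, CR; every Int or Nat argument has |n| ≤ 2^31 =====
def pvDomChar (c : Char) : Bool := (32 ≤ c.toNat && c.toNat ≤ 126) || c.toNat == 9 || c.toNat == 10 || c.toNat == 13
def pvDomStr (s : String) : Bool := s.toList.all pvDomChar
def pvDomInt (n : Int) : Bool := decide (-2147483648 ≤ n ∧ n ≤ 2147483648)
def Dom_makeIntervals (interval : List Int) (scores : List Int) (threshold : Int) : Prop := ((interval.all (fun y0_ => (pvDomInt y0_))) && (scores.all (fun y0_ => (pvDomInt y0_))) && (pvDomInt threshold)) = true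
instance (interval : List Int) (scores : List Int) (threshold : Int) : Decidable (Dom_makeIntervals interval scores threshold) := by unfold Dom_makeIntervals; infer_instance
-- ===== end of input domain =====

-- B segments the zipped (value, score) pairs into maximal same-flag runs and then pairs
-- each high run with the immediately following low run (alternative decomposition; return
-- value equivalence proved on inputs where A does not raise).

-- ===== PORT A =====
-- one iteration of A's loop body; state = (news, x_in, x_fin, mask)
def pvAStep (interval : List Int) (scores : List Int) (threshold : Int)
    (st : List (Int × Int) × Option Int × Option Int × List Bool) (i : Int) :
    List (Int × Int) × Option Int × Option Int × List Bool :=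
  let news := st.1
  let x_in := st.2.1
  let x_fin := st.2.2.1
  let mask := st.2.2.2
  if PySem.List.pyGetD scores i 0 < threshold then
    let mask := mask ++ [false]
    match x_in with
    | none => (news, x_in, x_fin, mask)   -- continue
    | some xv =>
      let x_fin := PySem.List.pyGetD interval i 0
      (news ++ [(xv, x_fin)], none, none, mask)
  else
    let mask := mask ++ [true]
    match x_in with
    | none => (news, some (PySem.List.pyGetD interval i 0), x_fin, mask)
    | some xv => (news, some xv, some (PySem.List.pyGetD interval i 0), mask)

def makeIntervals (interval : List Int) (scores : List Int) (threshold : Int) : List (Int × Int) :=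
  ((PySem.List.pyRange 0 (interval.length : Int) 1).foldl
      (pvAStep interval scores threshold) ([], none, none, [])).1

-- ===== PORT B =====
-- pass 1 loop body: extend the run list by (flag, value) when the flag changes
def pvBRunStep (threshold : Int) (runs : List (Bool × Int)) (p : Int × Int) : List (Bool × Int) :=
  let f := decide (threshold ≤ p.2)
  match runs.getLast? with
  | none => runs ++ [(f, p.1)]
  | some (g, _) => if g ≠ f then runs ++ [(f, p.1)] else runs

def makeIntervals_alt (interval : List Int) (scores : List Int) (threshold : Int) : List (Int × Int) :=
  let runs := (List.zip interval scores).foldl (pvBRunStep threshold) []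
  (List.zip runs runs.tail).foldl
    (fun news q => if q.1.1 && !q.2.1 then news ++ [(q.1.2, q.2.2)] else news) []

-- ===== PRECONDITION & SPEC =====
-- Pre_ excludes exactly the inputs where A raises IndexError: scores shorter than interval.
def Pre_makeIntervals (interval : List Int) (scores : List Int) (threshold : Int) : Prop :=
  interval.length ≤ scores.length
instance (interval : List Int) (scores : List Int) (threshold : Int) : Decidable (Pre_makeIntervals interval scores threshold) := by unfold Pre_makeIntervals; infer_instance

def pvWitness_makeIntervals : List Int × List Int × Int := ([1, 2, 3, 4], [60, 70, 10, 80], 50)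

def Spec_makeIntervals (interval : List Int) (scores : List Int) (threshold : Int) (out : List (Int × Int)) : Prop := out = makeIntervals_alt interval scores threshold
instance (interval : List Int) (scores : List Int) (threshold : Int) (out : List (Int × Int)) : Decidable (Spec_makeIntervals interval scores threshold out) := by unfold Spec_makeIntervals; infer_instance

-- ===== CLAIM (what is proved, stated in full; the proofs are below) =====
def Claim_equal_makeIntervals : Prop := ∀ (interval : List Int) (scores : List Int) (threshold : Int), Dom_makeIntervals interval scores threshold → Pre_makeIntervals interval scores threshold → Spec_makeIntervals interval scores threshold (makeIntervals interval scores threshold)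

-- ===== LEMMAS AND PROOFS =====

-- A's loop, rephrased structurally over the zipped (value, score) pairs
def pvARec (threshold : Int) : Option Int → List (Int × Int) → List (Int × Int)
  | _, [] => []
  | none, (v, s) :: rest =>
      if s < threshold then pvARec threshold none rest else pvARec threshold (some v) rest
  | some x, (v, s) :: rest =>
      if s < threshold then (x, v) :: pvARec threshold none rest
      else pvARec threshold (some x) rest

-- B's pass 1, structurally: maximal runs, keyed by the previous flag
def pvSeg (threshold : Int) : Option Bool → List (Int × Int) → List (Bool × Int)
  | _, [] => []
  | last, (v, s) :: rest =>
      let f := decide (threshold ≤ s)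
      if last = some f then pvSeg threshold (some f) rest
      else (f, v) :: pvSeg threshold (some f) rest

-- B's pass 2, structurally: adjacent run pairs
def pvPairs : List (Bool × Int) → List (Int × Int)
  | [] => []
  | [_] => []
  | a :: b :: rest => (if a.1 && !b.1 then [(a.2, b.2)] else []) ++ pvPairs (b :: rest)

-- index loop over two lists = fold over their zip (for any offset k)
lemma pv_foldl_idx_zip {σ : Type} (f : σ → Int → Int → σ) (xs ys : List Int)
    (h : xs.length ≤ ys.length) :
    ∀ (n k : Nat), xs.length - k = n → ∀ (s : σ),
      (PySem.List.pyRange (k : Int) (xs.length : Int) 1).foldl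
          (fun st i => f st (PySem.List.pyGetD xs i 0) (PySem.List.pyGetD ys i 0)) s
        = ((xs.drop k).zip (ys.drop k)).foldl (fun st p => f st p.1 p.2) s := by
  intro n
  induction n with
  | zero =>
    intro k hk s
    have hlen : xs.length ≤ k := by omega
    rw [PySem.List.pyRange_one_eq_nil (by exact_mod_cast hlen)]
    rw [List.drop_eq_nil_of_le hlen]
    simp
  | succ m ih =>
    intro k hk s
    have hklt : k < xs.length := by omega
    have hky : k < ys.length := by omega
    rw [PySem.List.pyRange_one_cons (by exact_mod_cast hklt)]
    rw [List.drop_eq_getElem_cons hklt, List.drop_eq_getElem_cons hky]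
    simp only [List.zip_cons_cons, List.foldl_cons]
    have : ((k : Int) + 1) = ((k + 1 : Nat) : Int) := by push_cast; ring
    rw [this, ih (k + 1) (by omega)]
    simp [PySem.List.pyGetD_natCast, List.getD_eq_getElem?_getD, hklt, hky]

-- the generic step A performs on a (value, score) pair
def pvAStep' (threshold : Int)
    (st : List (Int × Int) × Option Int × Option Int × List Bool) (v s : Int) :
    List (Int × Int) × Option Int × Option Int × List Bool :=
  if s < threshold then
    match st.2.1 with
    | none => (st.1, none, st.2.2.1, st.2.2.2 ++ [false])
    | some xv => (st.1 ++ [(xv, v)], none, none, st.2.2.2 ++ [false])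
  else
    match st.2.1 with
    | none => (st.1, some v, st.2.2.1, st.2.2.2 ++ [true])
    | some xv => (st.1, some xv, some v, st.2.2.2 ++ [true])

lemma pv_astep_eq (interval scores : List Int) (threshold : Int)
    (st : List (Int × Int) × Option Int × Option Int × List Bool) (i : Int) :
    pvAStep interval scores threshold st i
      = pvAStep' threshold st (PySem.List.pyGetD interval i 0) (PySem.List.pyGetD scores i 0) := by
  rcases st with ⟨news, x_in, x_fin, mask⟩
  cases x_in <;> simp [pvAStep, pvAStep']

lemma pv_afold_arec (threshold : Int) :
    ∀ (L : List (Int × Int)) (news : List (Int × Int)) (x_in : Option Int)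
      (x_fin : Option Int) (mask : List Bool),
      (L.foldl (fun st p => pvAStep' threshold st p.1 p.2) (news, x_in, x_fin, mask)).1
        = news ++ pvARec threshold x_in L := by
  intro L
  induction L with
  | nil => intro news x_in x_fin mask; simp [pvARec]
  | cons p rest ih =>
    intro news x_in x_fin mask
    rcases p with ⟨v, s⟩
    simp only [List.foldl_cons]
    by_cases hs : s < threshold
    · cases x_in with
      | none =>
        rw [show pvAStep' threshold (news, none, x_fin, mask) v s = (news, none, x_fin, mask ++ [false]) from by
            simp [pvAStep', hs]]
        rw [ih]; simp [pvARec, hs]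
      | some xv =>
        rw [show pvAStep' threshold (news, some xv, x_fin, mask) v s
            = (news ++ [(xv, v)], none, none, mask ++ [false]) from by
            simp [pvAStep', hs]]
        rw [ih]; simp [pvARec, hs]
    · cases x_in with
      | none =>
        rw [show pvAStep' threshold (news, none, x_fin, mask) v s = (news, some v, x_fin, mask ++ [true]) from by
            simp [pvAStep', hs]]
        rw [ih]; simp [pvARec, hs]
      | some xv =>
        rw [show pvAStep' threshold (news, some xv, x_fin, mask) v s
            = (news, some xv, some v, mask ++ [true]) from by
            simp [pvAStep', hs]]
        rw [ih]; simp [pvARec, hs]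

-- B's pass-1 fold = pvSeg keyed by the last flag of the accumulator
lemma pv_bfold_seg (threshold : Int) :
    ∀ (L : List (Int × Int)) (acc : List (Bool × Int)),
      L.foldl (pvBRunStep threshold) acc
        = acc ++ pvSeg threshold (acc.getLast?.map (·.1)) L := by
  intro L
  induction L with
  | nil => intro acc; simp [pvSeg]
  | cons p rest ih =>
    intro acc
    rcases p with ⟨v, s⟩
    simp only [List.foldl_cons]
    by_cases hl : acc.getLast? = none
    · have hacc : acc = [] := List.getLast?_eq_none_iff.mp hl
      subst hacc
      rw [show pvBRunStep threshold [] (v, s) = [(decide (threshold ≤ s), v)] from rfl, ih]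
      simp [pvSeg]
    · obtain ⟨⟨g, w⟩, hg⟩ := Option.ne_none_iff_exists'.mp hl
      by_cases hgf : g = decide (threshold ≤ s)
      · have hstep : pvBRunStep threshold acc (v, s) = acc := by
          simp [pvBRunStep, hg, hgf]
        rw [hstep, ih]
        simp [pvSeg, hg, hgf]
      · have hstep : pvBRunStep threshold acc (v, s) = acc ++ [(decide (threshold ≤ s), v)] := by
          simp [pvBRunStep, hg, hgf]
        rw [hstep, ih]
        simp [pvSeg, hg, hgf, List.getLast?_append]

-- B's pass-2 fold = pvPairs
lemma pv_pairs_fold :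
    ∀ (r : List (Bool × Int)) (acc : List (Int × Int)),
      (List.zip r r.tail).foldl
          (fun news q => if q.1.1 && !q.2.1 then news ++ [(q.1.2, q.2.2)] else news) acc
        = acc ++ pvPairs r := by
  intro r
  induction r with
  | nil => intro acc; simp [pvPairs]
  | cons a rest ih =>
    intro acc
    cases rest with
    | nil => simp [pvPairs]
    | cons b rest' =>
      simp only [List.tail_cons, List.zip_cons_cons, List.foldl_cons]
      rw [show (b :: rest').zip rest' = (b :: rest').zip (b :: rest').tail from rfl, ih]
      by_cases h : a.1 && !b.1 <;> simp [pvPairs, h, List.append_assoc]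

lemma pv_pairs_cons_false (v : Int) (S : List (Bool × Int)) :
    pvPairs ((false, v) :: S) = pvPairs S := by
  cases S with
  | nil => rfl
  | cons c S' => simp [pvPairs]

-- the heart: A's streaming recursion = B's segment-then-pair, with the three run states
lemma pv_core (threshold : Int) :
    ∀ (L : List (Int × Int)),
      pvARec threshold none L = pvPairs (pvSeg threshold none L)
      ∧ pvARec threshold none L = pvPairs (pvSeg threshold (some false) L)
      ∧ ∀ (x : Int), pvARec threshold (some x) L
          = pvPairs ((true, x) :: pvSeg threshold (some true) L) := by
  intro L
  induction L with
  | nil => exact ⟨rfl, rfl, fun x => rfl⟩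
  | cons p rest ih =>
    obtain ⟨ih1, ih2, ih3⟩ := ih
    rcases p with ⟨v, s⟩
    by_cases hs : s < threshold
    · have hf : decide (threshold ≤ s) = false := by simp; omega
      refine ⟨?_, ?_, ?_⟩
      · simp [pvARec, pvSeg, hs, hf, pv_pairs_cons_false, ih2]
      · simp [pvARec, pvSeg, hs, hf, ih2]
      · intro x
        simp only [pvARec, if_pos hs, pvSeg, hf]
        norm_num
        rw [show pvPairs ((true, x) :: (false, v) :: pvSeg threshold (some false) rest)
            = (x, v) :: pvPairs ((false, v) :: pvSeg threshold (some false) rest) by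
          simp [pvPairs]]
        rw [pv_pairs_cons_false, ih2]
    · have hf : decide (threshold ≤ s) = true := by simp; omega
      refine ⟨?_, ?_, ?_⟩
      · simp only [pvARec, if_neg hs, pvSeg, hf]
        exact ih3 v
      · simp only [pvARec, if_neg hs, pvSeg, hf]
        norm_num
        exact ih3 v
      · intro x
        simp only [pvARec, if_neg hs, pvSeg, hf]
        norm_num
        exact ih3 x

-- ===== VERDICT (by name: the statement is the Claim_ definition above) =====
theorem makeIntervals_spec : Claim_equal_makeIntervals := by
  intro interval scores threshold _ hpre
  unfold Spec_makeIntervals makeIntervals makeIntervals_alt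
  have hstep : (fun st i => pvAStep interval scores threshold st i)
      = fun st i => pvAStep' threshold st (PySem.List.pyGetD interval i 0)
          (PySem.List.pyGetD scores i 0) := by
    funext st i; exact pv_astep_eq interval scores threshold st i
  rw [show (PySem.List.pyRange 0 (interval.length : Int) 1).foldl
        (pvAStep interval scores threshold) ([], none, none, [])
      = (PySem.List.pyRange ((0 : Nat) : Int) (interval.length : Int) 1).foldl
        (fun st i => pvAStep' threshold st (PySem.List.pyGetD interval i 0)
          (PySem.List.pyGetD scores i 0)) ([], none, none, []) by
    rw [← hstep]; norm_num]
  rw [pv_foldl_idx_zip (fun st v s => pvAStep' threshold st v s) interval scores hpre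
      interval.length 0 (by omega)]
  simp only [List.drop_zero]
  rw [pv_afold_arec, pv_bfold_seg, pv_pairs_fold]
  simp only [List.nil_append, List.getLast?_nil, Option.map_none]
  exact (pv_core threshold (interval.zip scores)).1
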